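-- pv_equiv track=rewrite | github.com/Shabeehak/LeetCode_Submissions | 3997-maximize-sum-of-at-most-k-distinct-elements/maximize-sum-of-at-most-k-distinct-elements.py | maxKDistinct
-- ===== SOURCE A (Python) =====
-- def maxKDistinct(nums, k):
--     """
--     :type nums: List[int]
--     :type k: int
--     :rtype: List[int]
--     """
--     res = []
--     val = 0
--     nums = set(nums)
--     if len(nums)>=k:
--         for i in range(k):
--             val = max(nums)
--             res.append(val)
--             nums.remove(val)
--     else:
--         for i in range(len(nums)):
--             val = max(nums)
--             res.append(val)
--             nums.remove(val)
--     return res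
-- ===== SOURCE B (Python) =====
-- def maxKDistinct(nums, k):
--     """
--     :type nums: List[int]
--     :type k: int
--     :rtype: List[int]
--     """
--     return sorted(set(nums), reverse=True)[:max(k, 0)]
-- ===== Notes on version B (the rewrite author's own statement) =====
-- stated objective: faster
-- what changed: Replaces A's branch on len(set)>=k and explicit loop of repeated max-then-remove extractions with a single sort of the deduplicated values in descending order followed by a slice of the first max(k,0) elements.
import Mathlib
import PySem

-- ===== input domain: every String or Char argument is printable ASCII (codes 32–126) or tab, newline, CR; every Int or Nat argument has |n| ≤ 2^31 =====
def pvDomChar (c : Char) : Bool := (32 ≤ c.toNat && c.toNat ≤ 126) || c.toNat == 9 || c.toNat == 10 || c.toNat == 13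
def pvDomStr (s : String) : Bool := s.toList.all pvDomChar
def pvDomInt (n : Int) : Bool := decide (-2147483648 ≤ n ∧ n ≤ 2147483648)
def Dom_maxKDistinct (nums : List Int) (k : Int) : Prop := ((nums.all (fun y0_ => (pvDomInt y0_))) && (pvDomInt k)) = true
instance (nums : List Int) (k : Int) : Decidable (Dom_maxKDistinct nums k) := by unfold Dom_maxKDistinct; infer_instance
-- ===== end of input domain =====

-- B replaces A's explicit loop of repeated max-then-remove extractions by one descending
-- sort of the deduplicated values sliced to max(k,0) elements (objective: faster, measured).

-- ===== PORT A =====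
-- loop body: val = max(nums); res.append(val); nums.remove(val)
-- (the 'none' arm is unreachable: the set is never empty when the body runs, so max never raises)
def pvStepA (st : List Int × PySem.Set Int) (_i : Int) : List Int × PySem.Set Int :=
  match PySem.List.max? st.2 (fun x => x) with
  | some v => (st.1 ++ [v], (PySem.Set.remove? st.2 v).getD st.2)
  | none => st

def maxKDistinct (nums : List Int) (k : Int) : List Int :=
  let s : PySem.Set Int := PySem.Set.ofList nums
  if (s.length : Int) ≥ k then
    ((PySem.List.pyRange 0 k 1).foldl pvStepA ([], s)).1
  else
    ((PySem.List.pyRange 0 (s.length : Int) 1).foldl pvStepA ([], s)).1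

-- ===== PORT B =====
def maxKDistinct_alt (nums : List Int) (k : Int) : List Int :=
  PySem.List.slice (PySem.List.sorted (PySem.Set.ofList nums) (fun x => x) true) none (some (max k 0))

-- ===== PRECONDITION & SPEC =====
def Spec_maxKDistinct (nums : List Int) (k : Int) (out : List Int) : Prop := out = maxKDistinct_alt nums k
instance (nums : List Int) (k : Int) (out : List Int) : Decidable (Spec_maxKDistinct nums k out) := by unfold Spec_maxKDistinct; infer_instance

-- ===== CLAIM (what is proved, stated in full; the proofs are below) =====
def Claim_equal_maxKDistinct : Prop := ∀ (nums : List Int) (k : Int), Dom_maxKDistinct nums k → Spec_maxKDistinct nums k (maxKDistinct nums k)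

-- ===== LEMMAS AND PROOFS =====

-- the pure extraction loop A's fold computes: n times take the max and erase it
def pvLoop : Nat → List Int → List Int × List Int
  | 0, s => ([], s)
  | n+1, s =>
    match PySem.List.max? s (fun x => x) with
    | some v => let p := pvLoop n (s.erase v); (v :: p.1, p.2)
    | none => ([], s)

lemma sorted_rev_nodup_gt (s : List Int) (h : s.Nodup) :
    (PySem.List.sorted s (fun x => x) true).Pairwise (· > ·) := by
  have hp := PySem.List.sorted_pairwise_rev s (fun x => x)
  have hn : (PySem.List.sorted s (fun x => x) true).Nodup :=
    (PySem.List.sorted_perm s (fun x => x) true).nodup_iff.mpr h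
  exact (hp.and hn).imp (fun {a b} hab => lt_of_le_of_ne hab.1 (Ne.symm hab.2))

lemma sorted_rev_cons_max (s : List Int) (v : Int) (hn : s.Nodup)
    (hv : PySem.List.max? s (fun x => x) = some v) :
    PySem.List.sorted s (fun x => x) true = v :: PySem.List.sorted (s.erase v) (fun x => x) true := by
  have hmem : v ∈ s := PySem.List.max?_mem hv
  have hperm : (v :: PySem.List.sorted (s.erase v) (fun x => x) true).Perm s := by
    exact ((PySem.List.sorted_perm (s.erase v) (fun x => x) true).cons v).trans
      (List.perm_cons_erase hmem).symm
  refine PySem.List.sorted_rev_eq_of_perm_of_pairwise_gt _ _ _ hperm ?_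
  rw [List.pairwise_cons]
  constructor
  · intro y hy
    have hy' : y ∈ s.erase v := (PySem.List.mem_sorted _ _ _ _).mp hy
    have hne : y ≠ v := (List.Nodup.mem_erase_iff hn).mp hy' |>.1
    have hle : y ≤ v := PySem.List.max?_isMax hv y (List.mem_of_mem_erase hy')
    exact lt_of_le_of_ne hle hne
  · exact sorted_rev_nodup_gt _ (hn.erase v)

lemma pvLoop_eq_take (n : Nat) (s : List Int) (hn : s.Nodup) (hle : n ≤ s.length) :
    (pvLoop n s).1 = (PySem.List.sorted s (fun x => x) true).take n := by
  induction n generalizing s with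
  | zero => simp [pvLoop]
  | succ m ih =>
    have hne : s ≠ [] := by intro h; subst h; simp at hle
    obtain ⟨v, hv⟩ : ∃ v, PySem.List.max? s (fun x => x) = some v := by
      cases h : PySem.List.max? s (fun x => x) with
      | some v => exact ⟨v, rfl⟩
      | none => exact absurd ((PySem.List.max?_eq_none_iff s _).mp h) hne
    have hmem : v ∈ s := PySem.List.max?_mem hv
    have hlen : m ≤ (s.erase v).length := by
      have := s.length_erase_of_mem hmem; omega
    simp only [pvLoop, hv]
    rw [ih (s.erase v) (hn.erase v) hlen, sorted_rev_cons_max s v hn hv, List.take_succ_cons]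

lemma foldl_stepA (l : List Int) (acc : List Int) (s : List Int) (hn : s.Nodup) :
    (l.foldl pvStepA (acc, s)).1 = acc ++ (pvLoop l.length s).1 := by
  induction l generalizing acc s with
  | nil => simp [pvLoop]
  | cons x t ih =>
    cases h : PySem.List.max? s (fun x => x) with
    | none =>
      simp only [List.foldl_cons, pvStepA, h, List.length_cons, pvLoop]
      rw [ih acc s hn]
      have : s = [] := (PySem.List.max?_eq_none_iff s _).mp h
      subst this
      cases t.length <;> simp [pvLoop, h]
    | some v =>
      have hmem : v ∈ s := PySem.List.max?_mem h
      simp only [List.foldl_cons, pvStepA, h, List.length_cons, pvLoop]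
      have hrm : (PySem.Set.remove? s v).getD s = s.erase v := by
        simp only [PySem.Set.remove?, PySem.Set.contains]
        rw [if_pos (by simpa using hmem), Option.getD_some, PySem.Set.discard,
            List.Nodup.erase_eq_filter hn]
        rfl
      rw [hrm]
      rw [ih (acc ++ [v]) (s.erase v) (hn.erase v)]
      simp

-- ===== VERDICT (by name: the statement is the Claim_ definition above) =====
theorem maxKDistinct_spec : Claim_equal_maxKDistinct := by
  intro nums k _
  unfold Spec_maxKDistinct maxKDistinct maxKDistinct_alt
  set s : List Int := PySem.Set.ofList nums with hs
  have hn : s.Nodup := PySem.Set.nodup_ofList nums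
  have hslice : PySem.List.slice (PySem.List.sorted s (fun x => x) true) none (some (max k 0))
      = (PySem.List.sorted s (fun x => x) true).take (max k 0).toNat :=
    PySem.List.slice_to _ (le_max_right k 0)
  by_cases hk : (s.length : Int) ≥ k
  · simp only [hk, if_pos]
    rw [foldl_stepA _ [] s hn, List.nil_append, PySem.List.length_pyRange_one]
    rw [pvLoop_eq_take _ s hn (by omega), hslice]
    congr 1
    omega
  · simp only [hk, if_neg, not_false_iff]
    rw [foldl_stepA _ [] s hn, List.nil_append, PySem.List.length_pyRange_one]
    have h0 : ((s.length : Int) - 0).toNat = s.length := by omega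
    rw [h0, pvLoop_eq_take _ s hn le_rfl, hslice]
    rw [List.take_of_length_le (le_of_eq (PySem.List.length_sorted _ _ _)),
        List.take_of_length_le]
    rw [PySem.List.length_sorted]
    omega
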